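-- pv_equiv track=rewrite | github.com/bertrand-caron/Blind_RMSD | moldata.py | split_equivalence_group
-- ===== SOURCE A (Python) =====
-- def split_equivalence_group(eq_list):
--     accu = 0
--     split_eq_list = []
--     for eq in eq_list:
--         if eq != -1: split_eq_list.append(eq)
--         else:
--             split_eq_list.append(eq-accu)
--             accu += 1
--     return split_eq_list
-- ===== SOURCE B (Python) =====
-- from itertools import accumulate
--
-- def split_equivalence_group(eq_list):
--     eq_list = list(eq_list)
--     counts = list(accumulate(1 if eq == -1 else 0 for eq in eq_list))
--     return [eq - (c - 1) if eq == -1 else eq for eq, c in zip(eq_list, counts)]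
-- ===== Notes on version B (the rewrite author's own statement) =====
-- stated objective: alternative
-- what changed: Replaces A's single stateful loop (mutable accumulator and append) with a two-pass decomposition: a prefix-sum table of sentinel counts built with itertools.accumulate, then a stateless zip/comprehension pass.
import Mathlib
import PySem

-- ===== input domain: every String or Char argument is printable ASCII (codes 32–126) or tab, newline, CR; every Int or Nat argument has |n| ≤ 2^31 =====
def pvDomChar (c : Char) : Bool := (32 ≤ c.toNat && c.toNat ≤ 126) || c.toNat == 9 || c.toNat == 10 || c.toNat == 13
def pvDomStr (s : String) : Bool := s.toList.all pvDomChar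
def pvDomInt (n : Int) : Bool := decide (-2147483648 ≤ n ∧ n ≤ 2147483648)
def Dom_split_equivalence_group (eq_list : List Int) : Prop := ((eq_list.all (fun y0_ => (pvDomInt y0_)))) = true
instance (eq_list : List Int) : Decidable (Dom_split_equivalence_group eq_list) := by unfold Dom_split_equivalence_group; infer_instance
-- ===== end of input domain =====

-- B replaces A's single stateful accumulator loop by a prefix-count table plus a stateless zip pass (objective: alternative decomposition).


-- ===== PORT A =====
-- Literal port of A's loop: state (accu, split_eq_list), appending at the back.
def split_equivalence_group (eq_list : List Int) : List Int :=
  (eq_list.foldl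
    (fun (s : Int × List Int) eq =>
      if eq ≠ -1 then (s.1, s.2 ++ [eq])
      else (s.1 + 1, s.2 ++ [eq - s.1]))
    (0, [])).2

-- ===== PORT B =====
-- itertools.accumulate ported by hand (exact: running sums of the list, starting from 0).
def pvAccumulate (acc : Int) : List Int → List Int
  | [] => []
  | x :: xs => (acc + x) :: pvAccumulate (acc + x) xs

def split_equivalence_group_alt (eq_list : List Int) : List Int :=
  let counts := pvAccumulate 0 (eq_list.map (fun eq => if eq = -1 then (1 : Int) else 0))
  (eq_list.zip counts).map (fun p => if p.1 = -1 then p.1 - (p.2 - 1) else p.1)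

-- ===== PRECONDITION & SPEC =====
def Spec_split_equivalence_group (eq_list : List Int) (out : List Int) : Prop := out = split_equivalence_group_alt eq_list
instance (eq_list : List Int) (out : List Int) : Decidable (Spec_split_equivalence_group eq_list out) := by unfold Spec_split_equivalence_group; infer_instance

-- ===== CLAIM (what is proved, stated in full; the proofs are below) =====
def Claim_equal_split_equivalence_group : Prop := ∀ (eq_list : List Int), Dom_split_equivalence_group eq_list → Spec_split_equivalence_group eq_list (split_equivalence_group eq_list)

-- ===== LEMMAS AND PROOFS =====

-- Common characterisation of both ports: a sentinel at prior-count a becomes eq - a.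
def pvCore (a : Int) : List Int → List Int
  | [] => []
  | x :: xs => if x = -1 then (x - a) :: pvCore (a + 1) xs else x :: pvCore a xs

theorem pvA_core (l : List Int) : ∀ (a : Int) (acc : List Int),
    (l.foldl
      (fun (s : Int × List Int) eq =>
        if eq ≠ -1 then (s.1, s.2 ++ [eq])
        else (s.1 + 1, s.2 ++ [eq - s.1]))
      (a, acc)).2 = acc ++ pvCore a l := by
  induction l with
  | nil => intro a acc; simp [pvCore]
  | cons x xs ih =>
    intro a acc
    rw [List.foldl_cons]
    by_cases hx : x = -1
    · rw [if_neg (show ¬ (x ≠ -1) from not_not_intro hx), ih, pvCore, if_pos hx,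
        List.append_assoc]
      rfl
    · rw [if_pos hx, ih, pvCore, if_neg hx, List.append_assoc]
      rfl

theorem pvB_core (l : List Int) : ∀ (a : Int),
    ((l.zip (pvAccumulate a (l.map (fun eq => if eq = -1 then (1 : Int) else 0)))).map
      (fun p => if p.1 = -1 then p.1 - (p.2 - 1) else p.1)) = pvCore a l := by
  induction l with
  | nil => intro a; simp [pvCore]
  | cons x xs ih =>
    intro a
    by_cases hx : x = -1 <;>
      simp [pvCore, pvAccumulate, hx, ih]

-- ===== VERDICT (by name: the statement is the Claim_ definition above) =====
theorem split_equivalence_group_spec : Claim_equal_split_equivalence_group := by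
  intro eq_list _
  unfold Spec_split_equivalence_group split_equivalence_group split_equivalence_group_alt
  rw [pvA_core, pvB_core]
  simp
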